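-- pv_equiv track=rewrite | github.com/pasong0511/coding-test | programmers/level1/다트게임.py | bonus_point
-- ===== SOURCE A (Python) =====
-- def bonus_point(bonus, num) :
--     end = 0
--     point = 1
--     if bonus == "S" :
--         end = 1
--     elif bonus == "D" :
--         end = 2
--     else :
--         end = 3
--
--     for _ in range(1, end+1) :      #한번, 제곱, 세제곱 계산
--         point *= num
--     return int(point)
-- ===== SOURCE B (Python) =====
-- def bonus_point(bonus, num):
--     exp = {"S": 1, "D": 2}.get(bonus, 3)
--     return int(num ** exp)
-- ===== Notes on version B (the rewrite author's own statement) =====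
-- stated objective: simpler
-- what changed: Replaces the counted accumulation loop by a dict lookup of the exponent and a single closed-form power num**exp.
import Mathlib
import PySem

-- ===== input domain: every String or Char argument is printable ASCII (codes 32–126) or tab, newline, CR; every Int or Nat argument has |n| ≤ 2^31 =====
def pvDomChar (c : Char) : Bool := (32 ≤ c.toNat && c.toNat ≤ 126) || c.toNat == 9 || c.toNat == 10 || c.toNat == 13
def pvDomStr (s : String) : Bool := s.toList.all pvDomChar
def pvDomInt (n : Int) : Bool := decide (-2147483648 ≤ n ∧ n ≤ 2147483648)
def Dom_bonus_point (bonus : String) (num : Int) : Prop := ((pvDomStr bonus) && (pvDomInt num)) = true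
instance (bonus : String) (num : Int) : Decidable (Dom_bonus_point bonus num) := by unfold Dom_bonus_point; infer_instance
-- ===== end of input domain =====

-- B replaces A's counted multiplication loop by a dict lookup of the exponent and a closed-form power (simpler).


-- ===== PORT A =====
def bonus_point (bonus : String) (num : Int) : Int :=
  let e : Int := if bonus == "S" then 1 else if bonus == "D" then 2 else 3
  let point : Int :=
    (PySem.List.pyRange 1 (e + 1) 1).foldl (fun p _ => p * num) 1
  point

-- ===== PORT B =====
def bonus_point_alt (bonus : String) (num : Int) : Int :=
  let exp : Int := (PySem.Dict.ofList [("S", (1 : Int)), ("D", 2)]).getD bonus 3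
  num ^ exp.toNat

-- ===== PRECONDITION & SPEC =====
def Spec_bonus_point (bonus : String) (num : Int) (out : Int) : Prop := out = bonus_point_alt bonus num
instance (bonus : String) (num : Int) (out : Int) : Decidable (Spec_bonus_point bonus num out) := by unfold Spec_bonus_point; infer_instance

-- ===== CLAIM (what is proved, stated in full; the proofs are below) =====
def Claim_equal_bonus_point : Prop := ∀ (bonus : String) (num : Int), Dom_bonus_point bonus num → Spec_bonus_point bonus num (bonus_point bonus num)

-- ===== LEMMAS AND PROOFS =====

-- ===== VERDICT (by name: the statement is the Claim_ definition above) =====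
theorem bonus_point_spec : Claim_equal_bonus_point := by
  intro bonus num _
  unfold Spec_bonus_point bonus_point bonus_point_alt
  have hit : (PySem.Dict.ofList [("S", (1 : Int)), ("D", 2)]).items = [("S", 1), ("D", 2)] := by
    decide
  by_cases hS : bonus = "S"
  · subst hS
    have h1 : PySem.List.pyRange 1 2 1 = [1] := by decide
    simp [h1, PySem.Dict.getD, PySem.Dict.get?, hit, List.find?]
  · by_cases hD : bonus = "D"
    · subst hD
      have h2 : PySem.List.pyRange 1 3 1 = [1, 2] := by decide
      simp [h2, PySem.Dict.getD, PySem.Dict.get?, hit, List.find?]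
      ring
    · have h3 : PySem.List.pyRange 1 4 1 = [1, 2, 3] := by decide
      have e1 : ("S" == bonus) = false := by simpa using fun h => hS h.symm
      have e2 : ("D" == bonus) = false := by simpa using fun h => hD h.symm
      have f1 : (bonus == "S") = false := by simpa using hS
      have f2 : (bonus == "D") = false := by simpa using hD
      simp [f1, f2, h3, PySem.Dict.getD, PySem.Dict.get?, hit, List.find?, e1, e2]
      ring
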